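-- pv_equiv track=rewrite | github.com/modelblocks/modelblocks-release | resource-incrsem/scripts/linetrees2cuegraphs.py | lastdep
-- ===== SOURCE A (Python) =====
-- def lastdep( s ):
--   d = 0
--   j = len(s)
--   for i in range(len(s)-1,-1,-1):
--     if s[i]=='{': d+=1
--     if s[i]=='}': d-=1
--     if d==0 and s[i]=='-' and i+1<len(s) and s[i+1] in 'abcdghirv': return( str(s[i:j]) )
--     if d==0 and s[i]=='-': j=i
--   return ''
-- ===== SOURCE B (Python) =====
-- def lastdep(s):
--     n = len(s)
--     total = s.count('{') - s.count('}')
--     bounds = []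
--     p = 0
--     for i, c in enumerate(s):
--         if c == '{':
--             p += 1
--         elif c == '}':
--             p -= 1
--         elif c == '-' and p == total:
--             bounds.append(i)
--     end = n
--     for i in reversed(bounds):
--         if i + 1 < n and s[i + 1] in 'abcdghirv':
--             return s[i:end]
--         end = i
--     return ''
-- ===== Notes on version B (the rewrite author's own statement) =====
-- stated objective: alternative
-- what changed: A's single reverse scan with mutable depth/end state is replaced by a forward pass that collects top-level dash boundary indices (a dash is top-level iff its prefix brace balance equals the precomputed total balance, obtained via str.count) plus a separate selection pass over those boundaries from the right.
import Mathlib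
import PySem

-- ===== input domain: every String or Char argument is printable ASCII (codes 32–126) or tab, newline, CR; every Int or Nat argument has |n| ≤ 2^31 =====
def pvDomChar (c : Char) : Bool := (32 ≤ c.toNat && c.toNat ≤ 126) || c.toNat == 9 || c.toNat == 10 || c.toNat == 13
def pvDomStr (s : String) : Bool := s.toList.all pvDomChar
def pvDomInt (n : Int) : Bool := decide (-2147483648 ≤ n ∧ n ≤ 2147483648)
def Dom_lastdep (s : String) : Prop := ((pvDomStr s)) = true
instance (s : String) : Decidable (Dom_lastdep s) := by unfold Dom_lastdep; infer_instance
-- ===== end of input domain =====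

-- B replaces A's single reverse scan with mutable depth/end state by a forward pass collecting
-- the top-level dash boundaries (using the precomputed total brace balance) plus a separate
-- selection pass over those boundaries; objective: alternative decomposition (same cost).

-- ===== PORT A =====
-- membership test `c in 'abcdghirv'`
def lastdepKey (c : Char) : Bool := "abcdghirv".toList.contains c

-- reverse loop `for i in range(len(s)-1,-1,-1)`: k+1 counts the indices still to process,
-- the current index is k; d and j are the loop's mutable state; the two `if`s of the body are
-- mutually exclusive at the point the second runs, so they are merged in order.
-- The slice s[k:j] is taken with drop/take, exact here since 0 ≤ k and j ≤ n.
def lastdepGoA (cs : List Char) (n : Nat) : Nat → Int → Nat → String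
  | 0, _, _ => ""
  | k+1, d, j =>
    let c := cs.getD k ' '
    let d' := if c = '{' then d + 1 else if c = '}' then d - 1 else d
    if d' = 0 ∧ c = '-' ∧ k + 1 < n ∧ lastdepKey (cs.getD (k+1) ' ')
    then String.ofList ((cs.drop k).take (j - k))
    else lastdepGoA cs n k d' (if d' = 0 ∧ c = '-' then k else j)

def lastdep (s : String) : String :=
  lastdepGoA s.toList s.toList.length s.toList.length 0 s.toList.length

-- ===== PORT B =====
-- forward pass `for i, c in enumerate(s)`: collect the indices of dashes whose prefix balance p equals total
def lastdepBounds (total : Int) : List Char → Nat → Int → List Nat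
  | [], _, _ => []
  | c :: rest, i, p =>
    if c = '{' then lastdepBounds total rest (i+1) (p+1)
    else if c = '}' then lastdepBounds total rest (i+1) (p-1)
    else if c = '-' ∧ p = total then i :: lastdepBounds total rest (i+1) p
    else lastdepBounds total rest (i+1) p

-- selection pass `for i in reversed(bounds)` with the mutable `end`
def lastdepSel (cs : List Char) (n : Nat) : List Nat → Nat → String
  | [], _ => ""
  | i :: rest, e =>
    if i + 1 < n ∧ lastdepKey (cs.getD (i+1) ' ')
    then String.ofList ((cs.drop i).take (e - i))
    else lastdepSel cs n rest i

def lastdep_alt (s : String) : String :=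
  let cs := s.toList
  let n := cs.length
  let total : Int := (cs.count '{' : Int) - (cs.count '}' : Int)
  lastdepSel cs n ((lastdepBounds total cs 0 0).reverse) n

-- ===== PRECONDITION & SPEC =====
def Spec_lastdep (s : String) (out : String) : Prop := out = lastdep_alt s
instance (s : String) (out : String) : Decidable (Spec_lastdep s out) := by unfold Spec_lastdep; infer_instance

-- ===== CLAIM (what is proved, stated in full; the proofs are below) =====
def Claim_equal_lastdep : Prop := ∀ (s : String), Dom_lastdep s → Spec_lastdep s (lastdep s)

-- ===== LEMMAS AND PROOFS =====
def lastdepBalC (c : Char) : Int := if c = '{' then 1 else if c = '}' then -1 else 0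

def lastdepBal : List Char → Int
  | [] => 0
  | c :: l => lastdepBalC c + lastdepBal l

lemma lastdepBal_append (l1 l2 : List Char) :
    lastdepBal (l1 ++ l2) = lastdepBal l1 + lastdepBal l2 := by
  induction l1 with
  | nil => simp [lastdepBal]
  | cons a l ih => simp [lastdepBal, ih]; ring

lemma lastdepBal_count (cs : List Char) :
    (cs.count '{' : Int) - (cs.count '}' : Int) = lastdepBal cs := by
  induction cs with
  | nil => simp [lastdepBal]
  | cons c l ih =>
    simp only [List.count_cons, lastdepBal, lastdepBalC]
    by_cases h1 : c = '{' <;> by_cases h2 : c = '}' <;> simp_all <;> omega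

lemma lastdep_if_adj {c : Char} {x y total : Int} {n m : Nat} (hx : x = y) (hn : n = m) :
    (if c = '-' ∧ x = total then [n] else []) = (if c = '-' ∧ y = total then [m] else []) := by
  subst hx hn; rfl

lemma lastdepBounds_snoc (total : Int) (c : Char) (l : List Char) : ∀ (i : Nat) (p : Int),
    lastdepBounds total (l ++ [c]) i p =
      lastdepBounds total l i p ++
        (if c = '-' ∧ p + lastdepBal l = total then [i + l.length] else []) := by
  induction l with
  | nil =>
    intro i p
    simp only [List.nil_append, lastdepBounds, lastdepBal, List.length_nil, Nat.add_zero,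
      Int.add_zero]
    by_cases h1 : c = '{' <;> by_cases h2 : c = '}' <;> by_cases h3 : c = '-' ∧ p = total <;>
      simp_all
  | cons a l ih =>
    intro i p
    simp only [List.cons_append, lastdepBounds, lastdepBal, List.length_cons]
    by_cases h1 : a = '{'
    · rw [if_pos h1, if_pos h1, ih]
      congr 1
      have hc : lastdepBalC a = 1 := by simp [lastdepBalC, h1]
      exact lastdep_if_adj (by omega) (by omega)
    · rw [if_neg h1, if_neg h1]
      by_cases h2 : a = '}'
      · rw [if_pos h2, if_pos h2, ih]
        congr 1
        have hc : lastdepBalC a = -1 := by simp [lastdepBalC, h2]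
        exact lastdep_if_adj (by omega) (by omega)
      · rw [if_neg h2, if_neg h2]
        have hc : lastdepBalC a = 0 := by simp only [lastdepBalC, if_neg h1, if_neg h2]
        by_cases h3 : a = '-' ∧ p = total
        · rw [if_pos h3, if_pos h3, ih, List.cons_append]
          congr 2
          exact lastdep_if_adj (by omega) (by omega)
        · rw [if_neg h3, if_neg h3, ih]
          congr 1
          exact lastdep_if_adj (by omega) (by omega)

lemma lastdep_main (cs : List Char) : ∀ (k : Nat), k ≤ cs.length → ∀ (j : Nat),
    lastdepGoA cs cs.length k (lastdepBal (cs.drop k)) j =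
      lastdepSel cs cs.length ((lastdepBounds (lastdepBal cs) (cs.take k) 0 0).reverse) j := by
  intro k
  induction k with
  | zero => intro _ j; simp [lastdepGoA, lastdepBounds, lastdepSel]
  | succ k ih =>
    intro hk j
    have hklt : k < cs.length := by omega
    have htake : cs.take (k+1) = cs.take k ++ [cs[k]] := by
      simp only [List.take_add_one, List.getElem?_eq_getElem hklt, Option.toList_some]
    have hdrop : cs.drop k = cs[k] :: cs.drop (k+1) := List.drop_eq_getElem_cons hklt
    have hlen : (cs.take k).length = k := by simp; omega
    have hget : cs.getD k ' ' = cs[k] := by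
      simp [List.getD, List.getElem?_eq_getElem hklt]
    have hsplit : lastdepBal cs = lastdepBal (cs.take k) + lastdepBal (cs.drop k) := by
      rw [← lastdepBal_append, List.take_append_drop]
    have hd' : (if cs[k] = '{' then lastdepBal (cs.drop (k+1)) + 1
        else if cs[k] = '}' then lastdepBal (cs.drop (k+1)) - 1
        else lastdepBal (cs.drop (k+1))) = lastdepBal (cs.drop k) := by
      rw [hdrop]
      simp only [lastdepBal, lastdepBalC]
      split_ifs <;> ring
    rw [htake, lastdepBounds_snoc, List.reverse_append, hlen]
    simp only [lastdepGoA, hget, hd', Nat.zero_add]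
    by_cases hm : lastdepBal (cs.drop k) = 0 ∧ cs[k] = '-' ∧ k + 1 < cs.length ∧
        lastdepKey (cs.getD (k+1) ' ')
    · rw [if_pos hm]
      have hC : cs[k] = '-' ∧ (0:Int) + lastdepBal (cs.take k) = lastdepBal cs :=
        ⟨hm.2.1, by omega⟩
      rw [if_pos hC]
      simp only [List.reverse_cons, List.reverse_nil, List.nil_append, List.cons_append,
        lastdepSel]
      rw [if_pos ⟨hm.2.2.1, hm.2.2.2⟩]
    · rw [if_neg hm]
      by_cases hb : lastdepBal (cs.drop k) = 0 ∧ cs[k] = '-'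
      · have hC : cs[k] = '-' ∧ (0:Int) + lastdepBal (cs.take k) = lastdepBal cs :=
          ⟨hb.2, by omega⟩
        rw [if_pos hb, if_pos hC]
        simp only [List.reverse_cons, List.reverse_nil, List.nil_append, List.cons_append,
          lastdepSel]
        have hng : ¬ (k + 1 < cs.length ∧ lastdepKey (cs.getD (k+1) ' ') = true) := by
          intro h; exact hm ⟨hb.1, hb.2, h.1, h.2⟩
        rw [if_neg hng]
        exact ih (by omega) k
      · have hC : ¬ (cs[k] = '-' ∧ (0:Int) + lastdepBal (cs.take k) = lastdepBal cs) := by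
          rintro ⟨h1, h2⟩; exact hb ⟨by omega, h1⟩
        rw [if_neg hb, if_neg hC]
        simp only [List.reverse_nil, List.nil_append]
        exact ih (by omega) j

-- ===== VERDICT (by name: the statement is the Claim_ definition above) =====
theorem lastdep_spec : Claim_equal_lastdep := by
  intro s _
  unfold Spec_lastdep
  simp only [lastdep, lastdep_alt]
  rw [lastdepBal_count]
  have h := lastdep_main s.toList s.toList.length (le_refl _) s.toList.length
  rw [List.drop_length] at h
  rw [List.take_length] at h
  exact h
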